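-- pv_equiv track=rewrite | github.com/cfe-lab/MiCall | micall/utils/probe_finder.py | handle_x
-- ===== SOURCE A (Python) =====
-- def handle_x(sequence):
--     length = len(sequence)
--     midpoint = length / 2
--     x_positions = [i for i,j in enumerate(sequence) if j == 'X']
--     try:
--         rightmost_x = max([x for x in x_positions if x <= midpoint])
--     except ValueError:
--         rightmost_x = None
--     try:
--         leftmost_x = min([x for x in x_positions if x > midpoint])
--     except ValueError:
--         leftmost_x = None
--     if rightmost_x and leftmost_x:
--         sequence = sequence[rightmost_x+1:leftmost_x]
--     elif rightmost_x:
--         sequence = sequence[rightmost_x+1:]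
--     else:
--         sequence = sequence[:leftmost_x]
--     return sequence
-- ===== SOURCE B (Python) =====
-- def handle_x(sequence):
--     # Split at the midpoint; keep what follows the last X in the left half
--     # (rpartition) and what precedes the first X in the right half (partition).
--     half = len(sequence) // 2 + 1
--     tail = sequence[:half].rpartition('X')[2]
--     head = sequence[half:].partition('X')[0]
--     return tail + head
-- ===== Notes on version B (the rewrite author's own statement) =====
-- stated objective: faster
-- what changed: A builds an X-position list plus two filtered comprehensions fed to max()/min() and slices by index; B splits the string at the midpoint and uses str.rpartition/str.partition to keep the part after the last X of the left half and before the first X of the right half, concatenating the two pieces (Python-level scans replaced by C-implemented string methods).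
-- intended difference: When the only X marker in the first half of the sequence is the very first character (index 0), A's truthiness test on rightmost_x treats index 0 as absent and returns the sequence with that leading marker still attached; B trims it, which is the intended trimming of the marker. — e.g. on handle_x("XabXc"): A returns "Xab", B returns "ab"
import Mathlib
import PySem

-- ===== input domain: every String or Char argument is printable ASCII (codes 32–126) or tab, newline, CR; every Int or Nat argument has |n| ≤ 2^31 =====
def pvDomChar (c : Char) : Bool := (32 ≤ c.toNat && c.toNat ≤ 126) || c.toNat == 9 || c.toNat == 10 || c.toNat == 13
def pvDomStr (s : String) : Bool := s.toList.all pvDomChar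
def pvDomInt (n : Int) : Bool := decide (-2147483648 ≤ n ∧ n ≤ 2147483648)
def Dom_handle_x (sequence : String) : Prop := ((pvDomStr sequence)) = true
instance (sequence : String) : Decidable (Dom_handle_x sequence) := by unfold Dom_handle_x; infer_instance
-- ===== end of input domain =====

-- B trims by splitting the string at the midpoint and taking rpartition/partition pieces instead of
-- A's index comprehensions with max()/min() and slicing (objective: faster by a constant factor,
-- measured).

-- Python truthiness of an Optional[int]: None and 0 are falsy.
def pvTruthy (o : Option Int) : Bool :=
  match o with
  | none => false
  | some n => n != 0

-- ===== PORT A =====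
-- 'i <= midpoint' / 'x > midpoint' with midpoint = length/2 (a Python float) are ported as
-- '2*i ≤ length' / '2*x > length': exact, since both sides are integers well below 2^53.
def handle_x (sequence : String) : String :=
  let cs := sequence.toList
  let length : Int := cs.length
  let x_positions : List Int :=
    ((PySem.List.enumerate cs 0).filter (fun p => p.2 == 'X')).map (fun p => p.1)
  let rightmost_x : Option Int :=
    PySem.List.max? (x_positions.filter (fun x => 2 * x ≤ length)) (fun y => y)
  let leftmost_x : Option Int :=
    PySem.List.min? (x_positions.filter (fun x => 2 * x > length)) (fun y => y)
  if pvTruthy rightmost_x && pvTruthy leftmost_x then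
    String.ofList (PySem.List.slice cs (some (rightmost_x.getD 0 + 1)) (some (leftmost_x.getD 0)))
  else if pvTruthy rightmost_x then
    String.ofList (PySem.List.slice cs (some (rightmost_x.getD 0 + 1)) none)
  else
    String.ofList (PySem.List.slice cs none leftmost_x)

-- ===== PORT B =====
-- len(sequence)//2 + 1 is Nat division (len ≥ 0); sequence[:half] / sequence[half:] with
-- half ≥ 0 are List.take/drop (PySem.List.slice_to_natCast / slice_from_natCast).
-- s.rpartition('X')[2] is the suffix after the last 'X' (whole s if none): exactly
-- (s.reverse.takeWhile (· ≠ 'X')).reverse.  s.partition('X')[0] is the prefix before the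
-- first 'X' (whole s if none): exactly s.takeWhile (· ≠ 'X').  Both hand-ported here.
def handle_x_alt (sequence : String) : String :=
  let cs := sequence.toList
  let half : Nat := cs.length / 2 + 1
  let tail := ((cs.take half).reverse.takeWhile (fun c => c != 'X')).reverse
  let head := (cs.drop half).takeWhile (fun c => c != 'X')
  String.ofList (tail ++ head)

-- ===== PRECONDITION & SPEC =====
-- When the only 'X' in the first half is the very first character (index 0), A's
-- truthiness test on rightmost_x treats index 0 as absent and returns the sequence with that
-- leading X marker still attached; B trims it, which is the intended trimming of the marker.
def D_handle_x (sequence : String) : Prop :=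
  sequence.toList.head? = some 'X' ∧
    'X' ∉ ((sequence.toList.take (sequence.toList.length / 2 + 1)).drop 1)
instance (sequence : String) : Decidable (D_handle_x sequence) := by unfold D_handle_x; infer_instance

def Spec_handle_x (sequence : String) (out : String) : Prop := ¬ D_handle_x sequence → out = handle_x_alt sequence
instance (sequence : String) (out : String) : Decidable (Spec_handle_x sequence out) := by unfold Spec_handle_x; infer_instance

def pvDiffWitness_handle_x : String := "XabXc"
def pvDiffWitnessOut_handle_x : String × String := ("Xab", "ab")

-- ===== CLAIM (what is proved, stated in full; the proofs are below) =====
def Claim_unchanged_handle_x : Prop := ∀ (sequence : String), Dom_handle_x sequence → Spec_handle_x sequence (handle_x sequence)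
def Claim_changed_handle_x : Prop := Dom_handle_x (pvDiffWitness_handle_x) ∧ D_handle_x (pvDiffWitness_handle_x) ∧ handle_x (pvDiffWitness_handle_x) = pvDiffWitnessOut_handle_x.1 ∧ handle_x_alt (pvDiffWitness_handle_x) = pvDiffWitnessOut_handle_x.2 ∧ pvDiffWitnessOut_handle_x.1 ≠ pvDiffWitnessOut_handle_x.2
def Claim_exact_handle_x : Prop := ∀ (sequence : String), Dom_handle_x sequence → D_handle_x sequence → handle_x sequence ≠ handle_x_alt sequence

-- ===== LEMMAS AND PROOFS =====

-- on a ≤-sorted list, max? is the last element and min? the first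
theorem pv_foldl_max_sorted :
    ∀ (t : List Int) (x : Int), (∀ z ∈ t, x ≤ z) → t.Pairwise (· ≤ ·) →
      t.foldl max x = t.getLastD x := by
  intro t
  induction t with
  | nil => intro x _ _; rfl
  | cons y t' ih =>
      intro x hx hp
      have hxy : x ≤ y := hx y (by simp)
      have hp' := List.pairwise_cons.mp hp
      rw [List.foldl_cons, max_eq_right hxy, ih y hp'.1 hp'.2, List.getLastD_cons]

theorem pv_some_getLastD :
    ∀ (t : List Int) (y : Int), some (t.getLastD y) = (y :: t).getLast? := by
  intro t
  induction t with
  | nil => intro y; rfl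
  | cons z t'' ih =>
      intro y
      rw [List.getLastD_cons, List.getLast?_cons_cons]
      exact ih z

theorem pv_max?_sorted (xs : List Int) (h : xs.Pairwise (· ≤ ·)) :
    PySem.List.max? xs (fun y => y) = xs.getLast? := by
  cases xs with
  | nil => rfl
  | cons x t =>
      have hp := List.pairwise_cons.mp h
      rw [PySem.List.max?_id_cons, pv_foldl_max_sorted t x hp.1 hp.2]
      exact pv_some_getLastD t x

theorem pv_foldl_min_sorted :
    ∀ (t : List Int) (x : Int), (∀ z ∈ t, x ≤ z) → t.foldl min x = x := by
  intro t
  induction t with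
  | nil => intro x _; rfl
  | cons y t' ih =>
      intro x hx
      have hxy : x ≤ y := hx y (by simp)
      rw [List.foldl_cons, min_eq_left hxy]
      exact ih x (fun z hz => hx z (by simp [hz]))

theorem pv_min?_sorted (xs : List Int) (h : xs.Pairwise (· ≤ ·)) :
    PySem.List.min? xs (fun y => y) = xs.head? := by
  cases xs with
  | nil => rfl
  | cons x t =>
      have hp := List.pairwise_cons.mp h
      rw [PySem.List.min?_id_cons, pv_foldl_min_sorted t x hp.1]
      rfl

theorem pv_headX :
    ∀ (xs : List Char) (k : Int),
      (match (((PySem.List.enumerate xs k).filter (fun p => p.2 == 'X')).map Prod.fst).head? with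
       | none => xs.takeWhile (fun c => c != 'X') = xs
       | some m => ∃ j : Nat, m = k + (j : Int) ∧ j < xs.length ∧
           xs.takeWhile (fun c => c != 'X') = xs.take j) := by
  intro xs
  induction xs with
  | nil => intro k; exact rfl
  | cons x t ih =>
      intro k
      by_cases hx : x = 'X'
      · subst hx
        have hc : ((((k : Int), 'X') : Int × Char).2 == 'X') = true := rfl
        rw [PySem.List.enumerate_cons, List.filter_cons, if_pos hc, List.map_cons,
          List.head?_cons]
        exact ⟨0, by simp, by simp, by rw [List.takeWhile_cons, if_neg (by decide)]; rfl⟩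
      · rw [PySem.List.enumerate_cons, List.filter_cons, if_neg (by simpa using hx)]
        have htk : ((x != 'X') = true) := by simpa using hx
        have ih' := ih (k + 1)
        cases hh : (((PySem.List.enumerate t (k+1)).filter (fun p => p.2 == 'X')).map Prod.fst).head? with
        | none =>
            rw [hh] at ih'
            show List.takeWhile (fun c => c != 'X') (x :: t) = x :: t
            rw [List.takeWhile_cons, if_pos htk, ih']
        | some m =>
            rw [hh] at ih'
            obtain ⟨j, hm, hj, ht⟩ := ih'
            exact ⟨j + 1, by push_cast; omega, by simpa using Nat.succ_lt_succ hj,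
              by rw [List.takeWhile_cons, if_pos htk, ht]; rfl⟩

theorem pv_lastX :
    ∀ (xs : List Char) (k : Int),
      (match (((PySem.List.enumerate xs k).filter (fun p => p.2 == 'X')).map Prod.fst).getLast? with
       | none => 'X' ∉ xs ∧ (xs.reverse.takeWhile (fun c => c != 'X')).reverse = xs
       | some m => ∃ j : Nat, m = k + (j : Int) ∧ j < xs.length ∧ xs[j]? = some 'X' ∧
           'X' ∉ xs.drop (j + 1) ∧
           (xs.reverse.takeWhile (fun c => c != 'X')).reverse = xs.drop (j + 1)) := by
  intro xs k
  induction xs using List.reverseRecOn with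
  | nil => exact ⟨by simp, rfl⟩
  | append_singleton xs a ih =>
      rw [PySem.List.enumerate_append, List.filter_append, List.map_append]
      have hsing : PySem.List.enumerate [a] (k + (xs.length : Int)) = [((k + (xs.length : Int)), a)] := by
        rw [PySem.List.enumerate_cons, PySem.List.enumerate_nil]
      rw [hsing]
      by_cases ha : a = 'X'
      · subst ha
        have hc : ((((k + (xs.length : Int)), 'X') : Int × Char).2 == 'X') = true := rfl
        rw [List.filter_cons, if_pos hc, List.filter_nil, List.map_cons, List.map_nil,
          List.getLast?_concat]
        refine ⟨xs.length, rfl, by simp, ?_, ?_, ?_⟩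
        · rw [List.getElem?_concat_length]
        · rw [List.drop_of_length_le (by simp)]; simp
        · rw [List.reverse_append, List.reverse_singleton]
          show (List.takeWhile (fun c => c != 'X') ('X' :: xs.reverse)).reverse = _
          rw [List.takeWhile_cons, if_neg (by decide), List.reverse_nil,
            List.drop_of_length_le (by simp)]
      · have hfa : ((((k + (xs.length : Int)), a) : Int × Char).2 == 'X') = false := by simpa using ha
        have htk : ((a != 'X') = true) := by simpa using ha
        rw [List.filter_cons, hfa]
        simp only [Bool.false_eq_true, if_false, List.filter_nil, List.map_nil, List.append_nil]
        have hrev : ((xs ++ [a]).reverse.takeWhile (fun c => c != 'X')).reverse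
            = (xs.reverse.takeWhile (fun c => c != 'X')).reverse ++ [a] := by
          rw [List.reverse_append, List.reverse_singleton]
          show (List.takeWhile (fun c => c != 'X') (a :: xs.reverse)).reverse = _
          rw [List.takeWhile_cons, if_pos htk, List.reverse_cons]
        cases hh : (((PySem.List.enumerate xs k).filter (fun p => p.2 == 'X')).map Prod.fst).getLast? with
        | none =>
            rw [hh] at ih
            exact ⟨by
              simp only [List.mem_append, List.mem_singleton]
              rintro (h | h)
              · exact ih.1 h
              · exact ha h.symm, by rw [hrev, ih.2]⟩
        | some m =>
            rw [hh] at ih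
            obtain ⟨j, hm, hj, hget, hnot, htl⟩ := ih
            refine ⟨j, hm, by simp; omega, ?_, ?_, ?_⟩
            · rw [List.getElem?_append_left hj]; exact hget
            · rw [List.drop_append_of_le_length (by omega)]
              simp only [List.mem_append, List.mem_singleton]
              rintro (h | h)
              · exact hnot h
              · exact ha h.symm
            · rw [hrev, htl, List.drop_append_of_le_length (by omega)]

theorem pv_filter_split (cs : List Char) :
    (((PySem.List.enumerate cs 0).filter (fun p => p.2 == 'X')).map (fun p : Int × Char => p.1)).filter
        (fun x => decide (2 * x ≤ (cs.length : Int)))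
      = ((PySem.List.enumerate (cs.take (cs.length / 2 + 1)) 0).filter (fun p => p.2 == 'X')).map Prod.fst ∧
    (((PySem.List.enumerate cs 0).filter (fun p => p.2 == 'X')).map (fun p : Int × Char => p.1)).filter
        (fun x => decide (2 * x > (cs.length : Int)))
      = ((PySem.List.enumerate (cs.drop (cs.length / 2 + 1)) ((cs.take (cs.length / 2 + 1)).length : Int)).filter (fun p => p.2 == 'X')).map Prod.fst := by
  set n := cs.length with hn
  set half := n / 2 + 1 with hhalf
  have hsplit : PySem.List.enumerate cs 0
      = PySem.List.enumerate (cs.take half) 0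
        ++ PySem.List.enumerate (cs.drop half) (0 + ((cs.take half).length : Int)) := by
    conv_lhs => rw [← List.take_append_drop half cs]
    exact PySem.List.enumerate_append _ _ _
  have hlen_left : (cs.take half).length = min half n := by simp [hn]
  have hleft : ∀ x ∈ ((PySem.List.enumerate (cs.take half) 0).filter (fun p => p.2 == 'X')).map
      (fun p : Int × Char => p.1), 2 * x ≤ (n : Int) := by
    intro x hx
    obtain ⟨p, hp, hpx⟩ := List.mem_map.mp hx
    obtain ⟨j, hj, hpe⟩ := (PySem.List.mem_enumerate_iff _ _ _).mp (List.mem_filter.mp hp).1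
    subst hpe; subst hpx
    rw [hlen_left] at hj
    simp only [zero_add]
    have : 2 * j ≤ n := by omega
    omega
  have hright : ∀ x ∈ ((PySem.List.enumerate (cs.drop half) (0 + ((cs.take half).length : Int))).filter
      (fun p => p.2 == 'X')).map (fun p : Int × Char => p.1), 2 * x > (n : Int) := by
    intro x hx
    obtain ⟨p, hp, hpx⟩ := List.mem_map.mp hx
    obtain ⟨j, hj, hpe⟩ := (PySem.List.mem_enumerate_iff _ _ _).mp (List.mem_filter.mp hp).1
    subst hpe; subst hpx
    have hjlt : j < n - half := by simpa [hn] using hj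
    have hmin : min half n = half := by omega
    rw [hlen_left, hmin]
    simp only [zero_add]
    have : n < 2 * (half + j) := by omega
    omega
  have e1 : (((PySem.List.enumerate (cs.take half) 0).filter (fun p => p.2 == 'X')).map
        (fun p : Int × Char => p.1)).filter (fun x => decide (2 * x ≤ (n : Int)))
      = ((PySem.List.enumerate (cs.take half) 0).filter (fun p => p.2 == 'X')).map
        (fun p : Int × Char => p.1) :=
    List.filter_eq_self.mpr (fun x hx => by simpa using hleft x hx)
  have e2 : (((PySem.List.enumerate (cs.drop half) (0 + ((cs.take half).length : Int))).filter
        (fun p => p.2 == 'X')).map (fun p : Int × Char => p.1)).filter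
        (fun x => decide (2 * x ≤ (n : Int))) = [] :=
    List.filter_eq_nil_iff.mpr (fun x hx => by
      simp only [decide_eq_true_eq, not_le]
      exact hright x hx)
  have e3 : (((PySem.List.enumerate (cs.take half) 0).filter (fun p => p.2 == 'X')).map
        (fun p : Int × Char => p.1)).filter (fun x => decide (2 * x > (n : Int))) = [] :=
    List.filter_eq_nil_iff.mpr (fun x hx => by
      simp only [decide_eq_true_eq, gt_iff_lt, not_lt]
      exact hleft x hx)
  have e4 : (((PySem.List.enumerate (cs.drop half) (0 + ((cs.take half).length : Int))).filter
        (fun p => p.2 == 'X')).map (fun p : Int × Char => p.1)).filter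
        (fun x => decide (2 * x > (n : Int)))
      = ((PySem.List.enumerate (cs.drop half) (0 + ((cs.take half).length : Int))).filter
        (fun p => p.2 == 'X')).map (fun p : Int × Char => p.1) :=
    List.filter_eq_self.mpr (fun x hx => by simpa using hright x hx)
  constructor
  · rw [hsplit, List.filter_append, List.map_append, List.filter_append, e1, e2, List.append_nil]
  · rw [hsplit, List.filter_append, List.map_append, List.filter_append, e3, e4, List.nil_append]
    simp only [zero_add]

-- ===== VERDICT =====
theorem pvTruthy_none : pvTruthy none = false := rfl

theorem pvTruthy_some (n : Int) : pvTruthy (some n) = (n != 0) := rfl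

theorem handle_x_spec : Claim_unchanged_handle_x := by
  intro sequence _ hD
  have hD' : ¬ (sequence.toList.head? = some 'X' ∧
      'X' ∉ ((sequence.toList.take (sequence.toList.length / 2 + 1)).drop 1)) := hD
  show handle_x sequence = handle_x_alt sequence
  simp only [handle_x, handle_x_alt]
  obtain ⟨hfR, hfL⟩ := pv_filter_split sequence.toList
  rw [hfR, hfL]
  set cs := sequence.toList with hcs
  set n := cs.length with hn
  set half := n / 2 + 1 with hhalf
  have hsR : (((PySem.List.enumerate (cs.take half) 0).filter (fun p => p.2 == 'X')).map Prod.fst).Pairwise (· ≤ ·) :=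
    List.Pairwise.map _ (fun a b h => le_of_lt h) ((PySem.List.pairwise_lt_enumerate (cs.take half) 0).filter _)
  have hsL : (((PySem.List.enumerate (cs.drop half) (((cs.take half).length : Int))).filter (fun p => p.2 == 'X')).map Prod.fst).Pairwise (· ≤ ·) :=
    List.Pairwise.map _ (fun a b h => le_of_lt h) ((PySem.List.pairwise_lt_enumerate (cs.drop half) _).filter _)
  rw [pv_max?_sorted _ hsR, pv_min?_sorted _ hsL]
  have HR := pv_lastX (cs.take half) 0
  have HL := pv_headX (cs.drop half) (((cs.take half).length : Int))
  have hll : (cs.take half).length = min half n := by simp [hn]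
  have hdl : (cs.drop half).length = n - half := by simp [hn]
  cases hr : (((PySem.List.enumerate (cs.take half) 0).filter (fun p => p.2 == 'X')).map Prod.fst).getLast? with
  | none =>
      rw [hr] at HR
      cases hl : (((PySem.List.enumerate (cs.drop half) (((cs.take half).length : Int))).filter (fun p => p.2 == 'X')).map Prod.fst).head? with
      | none =>
          rw [hl] at HL
          simp only [pvTruthy_none, Bool.false_and, Bool.false_eq_true, if_false]
          rw [PySem.List.slice_none_none, HR.2, HL, List.take_append_drop]
      | some m =>
          rw [hl] at HL
          obtain ⟨j', hm, hj', hhd⟩ := HL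
          have hrn : half < n := by omega
          have hmin : min half n = half := by omega
          rw [hll, hmin] at hm
          simp only [pvTruthy_none, Bool.false_and, Bool.false_eq_true, if_false]
          have hmcast : m = ((half + j' : Nat) : Int) := by push_cast; omega
          rw [hmcast, PySem.List.slice_to_natCast, HR.2, hhd, List.take_add]
  | some m =>
      rw [hr] at HR
      obtain ⟨j, hm, hj, hget, hnot, htl⟩ := HR
      rw [hll] at hj
      have hj0 : j ≠ 0 := by
        intro h0
        subst h0
        refine hD' ⟨?_, ?_⟩
        · rw [List.head?_eq_getElem?, ← List.getElem?_take_of_lt (show 0 < half by omega)]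
          exact hget
        · simpa using hnot
      have hmt : pvTruthy (some m) = true := by
        rw [pvTruthy_some]
        simp only [bne_iff_ne, ne_eq]
        omega
      have hmcast1 : m + 1 = ((j + 1 : Nat) : Int) := by push_cast; omega
      cases hl : (((PySem.List.enumerate (cs.drop half) (((cs.take half).length : Int))).filter (fun p => p.2 == 'X')).map Prod.fst).head? with
      | none =>
          rw [hl] at HL
          simp only [hmt, pvTruthy_none, Bool.and_false, Bool.false_eq_true, if_false, if_true]
          simp only [Option.getD_some]
          rw [hmcast1, PySem.List.slice_from_natCast, htl, HL]
          have h1 : List.drop (j + 1) (cs.take half) = (cs.drop (j + 1)).take (half - (j + 1)) :=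
            List.drop_take
          have h2 : cs.drop half = (cs.drop (j + 1)).drop (half - (j + 1)) := by
            rw [List.drop_drop]
            congr 1
            omega
          rw [h1, h2, List.take_append_drop]
      | some m' =>
          rw [hl] at HL
          obtain ⟨j', hm', hj', hhd⟩ := HL
          have hrn : half < n := by omega
          have hmin : min half n = half := by omega
          rw [hll, hmin] at hm'
          have hm't : pvTruthy (some m') = true := by
            rw [pvTruthy_some]
            simp only [bne_iff_ne, ne_eq]
            omega
          simp only [hmt, hm't, Bool.and_self, if_true, Option.getD_some]
          have hmcast2 : m' = ((half + j' : Nat) : Int) := by push_cast; omega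
          rw [hmcast1, hmcast2, PySem.List.slice_natCast, htl, hhd]
          have h1 : List.drop (j + 1) (cs.take half) = (cs.drop (j + 1)).take (half - (j + 1)) :=
            List.drop_take
          have h2 : cs.drop half = (cs.drop (j + 1)).drop (half - (j + 1)) := by
            rw [List.drop_drop]
            congr 1
            omega
          rw [h1, h2, ← List.take_add]
          have harith : half - (j + 1) + j' = half + j' - (j + 1) := by omega
          rw [harith]

theorem handle_x_changed : Claim_changed_handle_x := by unfold Claim_changed_handle_x; decide

theorem handle_x_tight : Claim_exact_handle_x := by
  intro sequence _ hDcond heq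
  obtain ⟨hhead, hnotX⟩ := hDcond
  simp only [handle_x, handle_x_alt] at heq
  obtain ⟨hfR, hfL⟩ := pv_filter_split sequence.toList
  rw [hfR, hfL] at heq
  set cs := sequence.toList with hcs
  set n := cs.length with hn
  set half := n / 2 + 1 with hhalf
  have hsR : (((PySem.List.enumerate (cs.take half) 0).filter (fun p => p.2 == 'X')).map Prod.fst).Pairwise (· ≤ ·) :=
    List.Pairwise.map _ (fun a b h => le_of_lt h) ((PySem.List.pairwise_lt_enumerate (cs.take half) 0).filter _)
  have hsL : (((PySem.List.enumerate (cs.drop half) (((cs.take half).length : Int))).filter (fun p => p.2 == 'X')).map Prod.fst).Pairwise (· ≤ ·) :=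
    List.Pairwise.map _ (fun a b h => le_of_lt h) ((PySem.List.pairwise_lt_enumerate (cs.drop half) _).filter _)
  rw [pv_max?_sorted _ hsR, pv_min?_sorted _ hsL] at heq
  have HR := pv_lastX (cs.take half) 0
  have HL := pv_headX (cs.drop half) (((cs.take half).length : Int))
  have hll : (cs.take half).length = min half n := by simp [hn]
  have hdl : (cs.drop half).length = n - half := by simp [hn]
  have hne : cs ≠ [] := by intro h; rw [h] at hhead; simp at hhead
  have hn1 : 1 ≤ n := by
    cases hcl : cs with
    | nil => exact absurd hcl hne
    | cons a t => rw [hn, hcl]; simp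
  have hget0 : cs[0]? = some 'X' := by rwa [← List.head?_eq_getElem?]
  have hleft0 : (cs.take half)[0]? = some 'X' := by
    rw [List.getElem?_take_of_lt (show 0 < half by omega)]
    exact hget0
  cases hr : (((PySem.List.enumerate (cs.take half) 0).filter (fun p => p.2 == 'X')).map Prod.fst).getLast? with
  | none =>
      rw [hr] at HR
      exact HR.1 (List.mem_of_getElem? hleft0)
  | some m =>
      rw [hr] at HR
      obtain ⟨j, hm, hj, hget, hnot, htl⟩ := HR
      have hj0 : j = 0 := by
        by_contra hjne
        have h1j : 1 ≤ j := Nat.one_le_iff_ne_zero.mpr hjne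
        have : ((cs.take half).drop 1)[j - 1]? = some 'X' := by
          rw [List.getElem?_drop, show 1 + (j - 1) = j by omega]
          exact hget
        exact hnotX (List.mem_of_getElem? this)
      subst hj0
      have hm0 : m = 0 := by omega
      subst hm0
      rw [hr] at heq
      simp only [pvTruthy_some] at heq
      simp only [show ((0 : Int) != 0) = false from rfl, Bool.false_and, Bool.false_eq_true,
        if_false] at heq
      have heq' := congrArg String.toList heq
      simp only [String.toList_ofList] at heq'
      have hlen := congrArg List.length heq'
      cases hl : (((PySem.List.enumerate (cs.drop half) (((cs.take half).length : Int))).filter (fun p => p.2 == 'X')).map Prod.fst).head? with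
      | none =>
          rw [hl] at HL hlen
          rw [PySem.List.slice_none_none, htl, HL] at hlen
          simp only [List.length_append, List.length_drop, List.length_take] at hlen
          omega
      | some m' =>
          rw [hl] at HL hlen
          obtain ⟨j', hm', hj', hhd⟩ := HL
          have hrn : half < n := by omega
          have hmin : min half n = half := by omega
          rw [hll, hmin] at hm'
          have hmcast : m' = ((half + j' : Nat) : Int) := by push_cast; omega
          rw [hmcast, PySem.List.slice_to_natCast, htl, hhd] at hlen
          simp only [List.length_append, List.length_drop, List.length_take] at hlen
          omega
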